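-- pv_equiv track=rewrite | github.com/Vaquum/Origo | control-plane/origo_control_plane/migrations/runner.py | _top_level_semicolon_positions
-- ===== SOURCE A (Python) =====
-- def _top_level_semicolon_positions(sql: str) -> list[int]:
--     positions: list[int] = []
--     index = 0
--     in_single_quote = False
--     in_double_quote = False
--     in_backtick = False
--     in_line_comment = False
--     in_block_comment = False
--
--     while index < len(sql):
--         ch = sql[index]
--         nxt = sql[index + 1] if index + 1 < len(sql) else ''
--
--         if in_line_comment:
--             if ch == '\n':
--                 in_line_comment = False
--             index += 1
--             continue
--
--         if in_block_comment:
--             if ch == '*' and nxt == '/':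
--                 in_block_comment = False
--                 index += 2
--                 continue
--             index += 1
--             continue
--
--         if in_single_quote:
--             if ch == "'" and nxt == "'":
--                 index += 2
--                 continue
--             if ch == "'":
--                 in_single_quote = False
--             index += 1
--             continue
--
--         if in_double_quote:
--             if ch == '"' and nxt == '"':
--                 index += 2
--                 continue
--             if ch == '"':
--                 in_double_quote = False
--             index += 1
--             continue
--
--         if in_backtick:
--             if ch == '`' and nxt == '`':
--                 index += 2
--                 continue
--             if ch == '`':
--                 in_backtick = False
--             index += 1
--             continue
--
--         if ch == '-' and nxt == '-':
--             in_line_comment = True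
--             index += 2
--             continue
--
--         if ch == '/' and nxt == '*':
--             in_block_comment = True
--             index += 2
--             continue
--
--         if ch == "'":
--             in_single_quote = True
--             index += 1
--             continue
--
--         if ch == '"':
--             in_double_quote = True
--             index += 1
--             continue
--
--         if ch == '`':
--             in_backtick = True
--             index += 1
--             continue
--
--         if ch == ';':
--             positions.append(index)
--
--         index += 1
--
--     return positions
-- ===== SOURCE B (Python) =====
-- def _top_level_semicolon_positions(sql: str) -> list[int]:
--     positions: list[int] = []
--     i, n = 0, len(sql)
--     while i < n:
--         ch = sql[i]
--         if ch == '-' and sql[i + 1:i + 2] == '-':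
--             j = sql.find('\n', i + 2)
--             i = n if j == -1 else j + 1
--         elif ch == '/' and sql[i + 1:i + 2] == '*':
--             i = _skip_block_comment(sql, i + 2)
--         elif ch in ("'", '"', '`'):
--             i = _skip_quoted(sql, ch, i + 1)
--         else:
--             if ch == ';':
--                 positions.append(i)
--             i += 1
--     return positions
--
--
-- def _skip_block_comment(sql: str, i: int) -> int:
--     while True:
--         j = sql.find('*', i)
--         if j == -1:
--             return len(sql)
--         if sql[j + 1:j + 2] == '/':
--             return j + 2
--         i = j + 1
--
--
-- def _skip_quoted(sql: str, q: str, i: int) -> int: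
--     while True:
--         j = sql.find(q, i)
--         if j == -1:
--             return len(sql)
--         if sql[j + 1:j + 2] == q:
--             i = j + 2
--         else:
--             return j + 1
-- ===== Notes on version B (the rewrite author's own statement) =====
-- stated objective: faster
-- what changed: Replaced the per-character five-flag state machine with a top-level token skipper: on each comment/quote opener it jumps straight to the matching closer with str.find (handling doubled quotes and */), so comment/string bodies are scanned by the C-level find instead of one Python iteration per character.
import Mathlib
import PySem

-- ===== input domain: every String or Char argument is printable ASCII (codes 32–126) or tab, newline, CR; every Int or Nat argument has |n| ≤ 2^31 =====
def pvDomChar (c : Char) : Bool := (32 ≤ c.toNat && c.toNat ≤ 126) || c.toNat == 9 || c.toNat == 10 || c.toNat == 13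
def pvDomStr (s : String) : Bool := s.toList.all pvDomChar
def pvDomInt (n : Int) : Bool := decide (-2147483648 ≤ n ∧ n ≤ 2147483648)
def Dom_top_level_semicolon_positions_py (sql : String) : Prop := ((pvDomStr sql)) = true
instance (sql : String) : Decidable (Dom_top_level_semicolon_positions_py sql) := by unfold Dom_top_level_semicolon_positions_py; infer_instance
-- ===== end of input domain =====

-- B replaces A's per-character five-flag state machine by a top-level token skipper: on each
-- comment/quote opener it jumps straight to the matching closer with str.find; same return value.

-- ===== PORT A =====
-- A's while loop: index, the five in_* flags and the positions accumulator, one step per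
-- iteration.  The fuel argument (cs.length at the call, one unit per iteration, each iteration
-- moves index forward by ≥ 1 while index < cs.length) only makes the loop total; it is never
-- exhausted on the stated domain.
def pvLoopA (cs : List Char) : Nat → Nat → List Int → Bool → Bool → Bool → Bool → Bool → List Int
  | 0, _, positions, _, _, _, _, _ => positions
  | fuel + 1, index, positions, sq, dq, bt, lc, bc =>
    if index < cs.length then
      let ch := cs.getD index ' '
      let nxt := cs[index + 1]?
      if lc then
        pvLoopA cs fuel (index + 1) positions sq dq bt (if ch = '\n' then false else lc) bc
      else if bc then
        if ch = '*' ∧ nxt = some '/' then pvLoopA cs fuel (index + 2) positions sq dq bt lc false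
        else pvLoopA cs fuel (index + 1) positions sq dq bt lc bc
      else if sq then
        if ch = '\'' ∧ nxt = some '\'' then pvLoopA cs fuel (index + 2) positions sq dq bt lc bc
        else pvLoopA cs fuel (index + 1) positions (if ch = '\'' then false else sq) dq bt lc bc
      else if dq then
        if ch = '"' ∧ nxt = some '"' then pvLoopA cs fuel (index + 2) positions sq dq bt lc bc
        else pvLoopA cs fuel (index + 1) positions sq (if ch = '"' then false else dq) bt lc bc
      else if bt then
        if ch = '`' ∧ nxt = some '`' then pvLoopA cs fuel (index + 2) positions sq dq bt lc bc
        else pvLoopA cs fuel (index + 1) positions sq dq (if ch = '`' then false else bt) lc bc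
      else if ch = '-' ∧ nxt = some '-' then pvLoopA cs fuel (index + 2) positions sq dq bt true bc
      else if ch = '/' ∧ nxt = some '*' then pvLoopA cs fuel (index + 2) positions sq dq bt lc true
      else if ch = '\'' then pvLoopA cs fuel (index + 1) positions true dq bt lc bc
      else if ch = '"' then pvLoopA cs fuel (index + 1) positions sq true bt lc bc
      else if ch = '`' then pvLoopA cs fuel (index + 1) positions sq dq true lc bc
      else pvLoopA cs fuel (index + 1)
        (if ch = ';' then positions ++ [(index : Int)] else positions) sq dq bt lc bc
    else positions

def top_level_semicolon_positions_py (sql : String) : List Int :=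
  pvLoopA sql.toList sql.toList.length 0 [] false false false false false

-- ===== PORT B =====
-- sql.find(c, i) is ported as PySem.Chars.findFrom cs [c] i none (single-character needle).
-- Each while-True helper loop carries a fuel guard (cs.length + 1 at the call; the scan
-- position strictly increases per iteration), returning as on a failed find if exhausted;
-- the fuel is never exhausted on the stated domain.

-- _skip_block_comment
def pvSkipBlock (cs : List Char) : Nat → Nat → Nat
  | 0, _ => cs.length
  | fuel + 1, i =>
    let j := PySem.Chars.findFrom cs ['*'] (i : Int) none
    if j = -1 then cs.length
    else if cs[j.toNat + 1]? = some '/' then j.toNat + 2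
    else pvSkipBlock cs fuel (j.toNat + 1)

-- _skip_quoted
def pvSkipQuoted (cs : List Char) (q : Char) : Nat → Nat → Nat
  | 0, _ => cs.length
  | fuel + 1, i =>
    let j := PySem.Chars.findFrom cs [q] (i : Int) none
    if j = -1 then cs.length
    else if cs[j.toNat + 1]? = some q then pvSkipQuoted cs q fuel (j.toNat + 2)
    else j.toNat + 1

def pvLoopB (cs : List Char) : Nat → Nat → List Int → List Int
  | 0, _, positions => positions
  | fuel + 1, i, positions =>
    if i < cs.length then
      let ch := cs.getD i ' '
      if ch = '-' ∧ cs[i + 1]? = some '-' then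
        let j := PySem.Chars.findFrom cs ['\n'] ((i + 2 : Nat) : Int) none
        pvLoopB cs fuel (if j = -1 then cs.length else j.toNat + 1) positions
      else if ch = '/' ∧ cs[i + 1]? = some '*' then
        pvLoopB cs fuel (pvSkipBlock cs (cs.length + 1) (i + 2)) positions
      else if ch = '\'' ∨ ch = '"' ∨ ch = '`' then
        pvLoopB cs fuel (pvSkipQuoted cs ch (cs.length + 1) (i + 1)) positions
      else pvLoopB cs fuel (i + 1) (if ch = ';' then positions ++ [(i : Int)] else positions)
    else positions

def top_level_semicolon_positions_py_alt (sql : String) : List Int :=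
  pvLoopB sql.toList sql.toList.length 0 []

-- ===== PRECONDITION & SPEC =====
def Spec_top_level_semicolon_positions_py (sql : String) (out : List Int) : Prop := out = top_level_semicolon_positions_py_alt sql
instance (sql : String) (out : List Int) : Decidable (Spec_top_level_semicolon_positions_py sql out) := by unfold Spec_top_level_semicolon_positions_py; infer_instance

-- ===== CLAIM (what is proved, stated in full; the proofs are below) =====
def Claim_equal_top_level_semicolon_positions_py : Prop := ∀ (sql : String), Dom_top_level_semicolon_positions_py sql → Spec_top_level_semicolon_positions_py sql (top_level_semicolon_positions_py sql)

-- ===== LEMMAS AND PROOFS =====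

theorem pvGoShift (c : Char) (s : List Char) (k : Nat) :
    PySem.Chars.find.go [c] s k =
      if PySem.Chars.find.go [c] s 0 = -1 then -1 else PySem.Chars.find.go [c] s 0 + k := by
  induction s generalizing k with
  | nil => simp [PySem.Chars.find.go]
  | cons x xs ih =>
    by_cases hx : [c].isPrefixOf (x :: xs)
    · simp [PySem.Chars.find.go, hx]
    · have hge : -1 ≤ PySem.Chars.find.go [c] xs 0 := by
        have := PySem.Chars.neg_one_le_find xs [c]
        simpa [PySem.Chars.find] using this
      simp only [PySem.Chars.find.go, hx]
      rw [ih (k + 1), ih 1]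
      split_ifs <;> push_cast <;> omega

theorem pvFindHit (c : Char) (xs : List Char) : PySem.Chars.find (c :: xs) [c] = 0 := by
  simp [PySem.Chars.find, PySem.Chars.find.go, List.isPrefixOf]

theorem pvFindConsStep (x c : Char) (xs : List Char) (hx : x ≠ c) :
    PySem.Chars.find (x :: xs) [c] =
      if PySem.Chars.find xs [c] = -1 then -1 else PySem.Chars.find xs [c] + 1 := by
  have : ¬ [c].isPrefixOf (x :: xs) := by simp [List.isPrefixOf, Ne.symm hx]
  simp only [PySem.Chars.find, PySem.Chars.find.go, this]
  exact pvGoShift c xs 1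

theorem pvFFGe (cs : List Char) (c : Char) (i : Nat) (hi : cs.length ≤ i) :
    PySem.Chars.findFrom cs [c] (i : Int) none = -1 := by
  rcases Nat.eq_or_lt_of_le hi with h | h
  · rw [PySem.Chars.findFrom_natCast cs [c] i (by omega)]
    have : List.drop i cs = [] := by simp [← h]
    simp [this, PySem.Chars.find, PySem.Chars.find.go]
  · simp only [PySem.Chars.findFrom]
    rw [if_pos (by push_cast; omega)]

theorem pvFFHit (cs : List Char) (c : Char) (i : Nat) (hi : cs[i]? = some c) :
    PySem.Chars.findFrom cs [c] (i : Int) none = (i : Int) := by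
  have hlt : i < cs.length := by
    by_contra h
    simp [List.getElem?_eq_none (by omega : cs.length ≤ i)] at hi
  rw [PySem.Chars.findFrom_natCast cs [c] i (by omega)]
  have hd : List.drop i cs = c :: List.drop (i + 1) cs := by
    have hv : cs[i] = c := by simpa [List.getElem?_eq_getElem hlt] using hi
    rw [List.drop_eq_getElem_cons hlt, hv]
  rw [hd, pvFindHit]
  simp

theorem pvFFStep (cs : List Char) (c x : Char) (i : Nat) (hi : cs[i]? = some x) (hx : x ≠ c) :
    PySem.Chars.findFrom cs [c] (i : Int) none = PySem.Chars.findFrom cs [c] ((i + 1 : Nat) : Int) none := by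
  have hlt : i < cs.length := by
    by_contra h
    simp [List.getElem?_eq_none (by omega : cs.length ≤ i)] at hi
  rw [PySem.Chars.findFrom_natCast cs [c] i (by omega),
      PySem.Chars.findFrom_natCast cs [c] (i + 1) (by omega)]
  have hd : List.drop i cs = x :: List.drop (i + 1) cs := by
    have hv : cs[i] = x := by simpa [List.getElem?_eq_getElem hlt] using hi
    rw [List.drop_eq_getElem_cons hlt, hv]
  rw [hd, pvFindConsStep x c _ hx]
  have hge : -1 ≤ PySem.Chars.find (List.drop (i + 1) cs) [c] := PySem.Chars.neg_one_le_find _ _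
  split_ifs <;> push_cast <;> omega

theorem pvFindCharBounds (cs : List Char) (c : Char) (i : Nat)
    (h : PySem.Chars.findFrom cs [c] (i : Int) none ≠ -1) :
    i ≤ (PySem.Chars.findFrom cs [c] (i : Int) none).toNat ∧
      (PySem.Chars.findFrom cs [c] (i : Int) none).toNat < cs.length := by
  by_cases hi : i ≤ cs.length
  · rw [PySem.Chars.findFrom_natCast cs [c] i hi] at h ⊢
    by_cases hf : PySem.Chars.find (List.drop i cs) [c] = -1
    · simp [hf] at h
    · have hge : -1 ≤ PySem.Chars.find (List.drop i cs) [c] := PySem.Chars.neg_one_le_find _ _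
      have hnn : 0 ≤ PySem.Chars.find (List.drop i cs) [c] := by omega
      obtain ⟨hpre, -⟩ := PySem.Chars.find_spec hnn
      have hne : List.drop (PySem.Chars.find (List.drop i cs) [c]).toNat (List.drop i cs) ≠ [] := by
        intro hnil; rw [hnil] at hpre; exact absurd (List.prefix_nil.mp hpre) (by simp)
      have hlen : (PySem.Chars.find (List.drop i cs) [c]).toNat < (List.drop i cs).length := by
        by_contra hc
        exact hne (List.drop_eq_nil_of_le (by omega))
      rw [if_neg hf]
      simp only [List.length_drop] at hlen
      omega
  · exact absurd (pvFFGe cs c i (by omega)) h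

-- out-of-range unfoldings: past the end both loops return the accumulator whatever the fuel is
theorem pvLoopA_out (cs : List Char) (f i : Nat) (pos : List Int) (sq dq bt lc bc : Bool)
    (hi : cs.length ≤ i) : pvLoopA cs f i pos sq dq bt lc bc = pos := by
  cases f with
  | zero => rfl
  | succ f => rw [pvLoopA, if_neg (by omega)]

theorem pvLoopB_out (cs : List Char) (f i : Nat) (pos : List Int)
    (hi : cs.length ≤ i) : pvLoopB cs f i pos = pos := by
  cases f with
  | zero => rfl
  | succ f => rw [pvLoopB, if_neg (by omega)]

-- with sufficient fuel the loops do not depend on the exact fuel value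
set_option maxHeartbeats 1600000 in
theorem pvLoopA_fuel (cs : List Char) :
    ∀ f g i pos (sq dq bt lc bc : Bool), cs.length - i ≤ f → cs.length - i ≤ g →
      pvLoopA cs f i pos sq dq bt lc bc = pvLoopA cs g i pos sq dq bt lc bc := by
  intro f
  induction f with
  | zero =>
    intro g i pos sq dq bt lc bc hf hg
    rw [pvLoopA_out cs 0 i pos sq dq bt lc bc (by omega),
        pvLoopA_out cs g i pos sq dq bt lc bc (by omega)]
  | succ f ih =>
    intro g i pos sq dq bt lc bc hf hg
    by_cases hlt : i < cs.length
    · obtain ⟨g', rfl⟩ : ∃ g', g = g' + 1 := ⟨g - 1, by omega⟩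
      rw [pvLoopA, pvLoopA, if_pos hlt, if_pos hlt]
      simp only []
      by_cases h1 : lc = true
      · rw [if_pos h1, if_pos h1]
        apply ih g' <;> omega
      · rw [if_neg h1, if_neg h1]
        by_cases h2 : bc = true
        · rw [if_pos h2, if_pos h2]
          by_cases h2b : cs.getD i ' ' = '*' ∧ cs[i + 1]? = some '/'
          · rw [if_pos h2b, if_pos h2b]
            apply ih g' <;> omega
          · rw [if_neg h2b, if_neg h2b]
            apply ih g' <;> omega
        · rw [if_neg h2, if_neg h2]
          by_cases h3 : sq = true
          · rw [if_pos h3, if_pos h3]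
            by_cases h3b : cs.getD i ' ' = '\'' ∧ cs[i + 1]? = some '\''
            · rw [if_pos h3b, if_pos h3b]
              apply ih g' <;> omega
            · rw [if_neg h3b, if_neg h3b]
              apply ih g' <;> omega
          · rw [if_neg h3, if_neg h3]
            by_cases h4 : dq = true
            · rw [if_pos h4, if_pos h4]
              by_cases h4b : cs.getD i ' ' = '"' ∧ cs[i + 1]? = some '"'
              · rw [if_pos h4b, if_pos h4b]
                apply ih g' <;> omega
              · rw [if_neg h4b, if_neg h4b]
                apply ih g' <;> omega
            · rw [if_neg h4, if_neg h4]
              by_cases h5 : bt = true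
              · rw [if_pos h5, if_pos h5]
                by_cases h5b : cs.getD i ' ' = '`' ∧ cs[i + 1]? = some '`'
                · rw [if_pos h5b, if_pos h5b]
                  apply ih g' <;> omega
                · rw [if_neg h5b, if_neg h5b]
                  apply ih g' <;> omega
              · rw [if_neg h5, if_neg h5]
                by_cases h6 : cs.getD i ' ' = '-' ∧ cs[i + 1]? = some '-'
                · rw [if_pos h6, if_pos h6]
                  apply ih g' <;> omega
                · rw [if_neg h6, if_neg h6]
                  by_cases h7 : cs.getD i ' ' = '/' ∧ cs[i + 1]? = some '*'
                  · rw [if_pos h7, if_pos h7]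
                    apply ih g' <;> omega
                  · rw [if_neg h7, if_neg h7]
                    by_cases h8 : cs.getD i ' ' = '\''
                    · rw [if_pos h8, if_pos h8]
                      apply ih g' <;> omega
                    · rw [if_neg h8, if_neg h8]
                      by_cases h9 : cs.getD i ' ' = '"'
                      · rw [if_pos h9, if_pos h9]
                        apply ih g' <;> omega
                      · rw [if_neg h9, if_neg h9]
                        by_cases h10 : cs.getD i ' ' = '`'
                        · rw [if_pos h10, if_pos h10]
                          apply ih g' <;> omega
                        · rw [if_neg h10, if_neg h10]
                          apply ih g' <;> omega
    · rw [pvLoopA_out cs _ i pos sq dq bt lc bc (by omega),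
          pvLoopA_out cs g i pos sq dq bt lc bc (by omega)]

theorem pvSkipQuoted_fuel (cs : List Char) (q : Char) :
    ∀ f g i, cs.length - i < f → cs.length - i < g →
      pvSkipQuoted cs q f i = pvSkipQuoted cs q g i := by
  intro f
  induction f with
  | zero => omega
  | succ f ih =>
    intro g i hf hg
    obtain ⟨g', rfl⟩ : ∃ g', g = g' + 1 := ⟨g - 1, by omega⟩
    rw [pvSkipQuoted, pvSkipQuoted]
    by_cases hj : PySem.Chars.findFrom cs [q] (i : Int) none = -1
    · simp [hj]
    · have hb := pvFindCharBounds cs q i hj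
      simp only [hj, if_neg, reduceIte]
      split_ifs
      · exact ih g' _ (by omega) (by omega)
      · rfl

theorem pvSkipBlock_fuel (cs : List Char) :
    ∀ f g i, cs.length - i < f → cs.length - i < g →
      pvSkipBlock cs f i = pvSkipBlock cs g i := by
  intro f
  induction f with
  | zero => omega
  | succ f ih =>
    intro g i hf hg
    obtain ⟨g', rfl⟩ : ∃ g', g = g' + 1 := ⟨g - 1, by omega⟩
    rw [pvSkipBlock, pvSkipBlock]
    by_cases hj : PySem.Chars.findFrom cs ['*'] (i : Int) none = -1
    · simp [hj]
    · have hb := pvFindCharBounds cs '*' i hj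
      simp only [hj, if_neg, reduceIte]
      split_ifs
      · rfl
      · exact ih g' _ (by omega) (by omega)

-- lower bounds on the skip results (the scan position never moves backwards into the string)
theorem pvSkipQuoted_ge (cs : List Char) (q : Char) :
    ∀ f i, min i cs.length ≤ pvSkipQuoted cs q f i := by
  intro f
  induction f with
  | zero => intro i; simp [pvSkipQuoted]
  | succ f ih =>
    intro i
    rw [pvSkipQuoted]
    by_cases hj : PySem.Chars.findFrom cs [q] (i : Int) none = -1
    · simp [hj]
    · have hb := pvFindCharBounds cs q i hj
      simp only [hj, if_neg, reduceIte]
      split_ifs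
      · have := ih ((PySem.Chars.findFrom cs [q] (i : Int) none).toNat + 2)
        omega
      · omega

theorem pvSkipBlock_ge (cs : List Char) :
    ∀ f i, min i cs.length ≤ pvSkipBlock cs f i := by
  intro f
  induction f with
  | zero => intro i; simp [pvSkipBlock]
  | succ f ih =>
    intro i
    rw [pvSkipBlock]
    by_cases hj : PySem.Chars.findFrom cs ['*'] (i : Int) none = -1
    · simp [hj]
    · have hb := pvFindCharBounds cs '*' i hj
      simp only [hj, if_neg, reduceIte]
      split_ifs
      · omega
      · have := ih ((PySem.Chars.findFrom cs ['*'] (i : Int) none).toNat + 1)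
        omega

-- stepping the skip helpers over a non-matching character
theorem pvSkipQuotedStep (cs : List Char) (q x : Char) (f i : Nat)
    (hc : cs[i]? = some x) (hx : x ≠ q) :
    pvSkipQuoted cs q f i = pvSkipQuoted cs q f (i + 1) := by
  cases f with
  | zero => rfl
  | succ f => rw [pvSkipQuoted, pvFFStep cs q x i hc hx, pvSkipQuoted]

theorem pvSkipBlockStep (cs : List Char) (x : Char) (f i : Nat)
    (hc : cs[i]? = some x) (hx : x ≠ '*') :
    pvSkipBlock cs f i = pvSkipBlock cs f (i + 1) := by
  cases f with
  | zero => rfl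
  | succ f => rw [pvSkipBlock, pvFFStep cs '*' x i hc hx, pvSkipBlock]

-- the position after a line comment entered at i, as pvLoopB computes it
def pvLineEnd (cs : List Char) (i : Nat) : Nat :=
  if PySem.Chars.findFrom cs ['\n'] (i : Int) none = -1 then cs.length
  else (PySem.Chars.findFrom cs ['\n'] (i : Int) none).toNat + 1

theorem pvLineSkip (cs : List Char) :
    ∀ f g i pos, cs.length - i ≤ f → cs.length - i ≤ g →
      pvLoopA cs f i pos false false false true false =
        pvLoopA cs g (pvLineEnd cs i) pos false false false false false := by
  intro f
  induction f with
  | zero =>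
    intro g i pos hf hg
    rw [pvLoopA_out cs 0 i pos _ _ _ _ _ (by omega)]
    unfold pvLineEnd
    rw [pvFFGe cs '\n' i (by omega), if_pos rfl,
        pvLoopA_out cs g cs.length pos _ _ _ _ _ (by omega)]
  | succ f ih =>
    intro g i pos hf hg
    by_cases hlt : i < cs.length
    · obtain ⟨x, hc⟩ : ∃ x, cs[i]? = some x := ⟨cs[i], List.getElem?_eq_getElem hlt⟩
      have hg2 : cs.getD i ' ' = x := by simp [List.getD_eq_getElem?_getD, hc]
      by_cases hx : x = '\n'
      · have hEnd : pvLineEnd cs i = i + 1 := by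
          unfold pvLineEnd
          rw [pvFFHit cs '\n' i (hx ▸ hc), if_neg (by omega)]
          simp
        rw [hEnd]
        conv_lhs => rw [pvLoopA]
        rw [if_pos hlt]
        simp only [hg2, hx, reduceIte, if_pos rfl]
        exact pvLoopA_fuel cs f g (i + 1) pos false false false false false (by omega) (by omega)
      · have hEnd : pvLineEnd cs i = pvLineEnd cs (i + 1) := by
          unfold pvLineEnd
          rw [pvFFStep cs '\n' x i hc hx]
        rw [hEnd]
        conv_lhs => rw [pvLoopA]
        rw [if_pos hlt]
        have hflag : (if cs.getD i ' ' = '\n' then false else true) = true := by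
          rw [hg2, if_neg hx]
        simp only [reduceIte, hflag]
        exact ih g (i + 1) pos (by omega) (by omega)
    · rw [pvLoopA_out cs _ i pos _ _ _ _ _ (by omega)]
      unfold pvLineEnd
      rw [pvFFGe cs '\n' i (by omega), if_pos rfl,
          pvLoopA_out cs g cs.length pos _ _ _ _ _ (by omega)]

theorem pvBlockSkip (cs : List Char) :
    ∀ f g i pos, cs.length - i ≤ f → cs.length - i ≤ g →
      pvLoopA cs f i pos false false false false true =
        pvLoopA cs g (pvSkipBlock cs (cs.length + 1) i) pos false false false false false := by
  intro f
  induction f with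
  | zero =>
    intro g i pos hf hg
    rw [pvLoopA_out cs 0 i pos _ _ _ _ _ (by omega)]
    have hEnd : pvSkipBlock cs (cs.length + 1) i = cs.length := by
      rw [pvSkipBlock, if_pos (pvFFGe cs '*' i (by omega))]
    rw [hEnd, pvLoopA_out cs g cs.length pos _ _ _ _ _ (by omega)]
  | succ f ih =>
    intro g i pos hf hg
    by_cases hlt : i < cs.length
    · obtain ⟨x, hc⟩ : ∃ x, cs[i]? = some x := ⟨cs[i], List.getElem?_eq_getElem hlt⟩
      have hg2 : cs.getD i ' ' = x := by simp [List.getD_eq_getElem?_getD, hc]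
      by_cases hx : x = '*'
      · have hff : PySem.Chars.findFrom cs ['*'] (i : Int) none = (i : Int) :=
          pvFFHit cs '*' i (hx ▸ hc)
        by_cases hn : cs[i + 1]? = some '/'
        · have hEnd : pvSkipBlock cs (cs.length + 1) i = i + 2 := by
            rw [pvSkipBlock]
            simp only [hff]
            rw [if_neg (by omega)]
            simp [hn]
          rw [hEnd]
          conv_lhs => rw [pvLoopA]
          rw [if_pos hlt]
          simp only [hg2, hx, hn, reduceIte, and_self, reduceIte]
          exact pvLoopA_fuel cs f g (i + 2) pos false false false false false (by omega) (by omega)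
        · have hEnd : pvSkipBlock cs (cs.length + 1) i = pvSkipBlock cs (cs.length + 1) (i + 1) := by
            conv_lhs => rw [pvSkipBlock]
            simp only [hff]
            rw [if_neg (by omega)]
            simp only [Int.toNat_natCast, hn, reduceIte, if_neg]
            exact pvSkipBlock_fuel cs cs.length (cs.length + 1) (i + 1) (by omega) (by omega)
          rw [hEnd]
          conv_lhs => rw [pvLoopA]
          rw [if_pos hlt]
          simp only [hg2, hx, hn, reduceIte, and_false, reduceIte]
          exact ih g (i + 1) pos (by omega) (by omega)
      · rw [pvSkipBlockStep cs x (cs.length + 1) i hc hx]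
        conv_lhs => rw [pvLoopA]
        rw [if_pos hlt]
        have hcond : (cs.getD i ' ' = '*' ∧ cs[i + 1]? = some '/') = False := by
          rw [hg2]; simp [hx]
        simp only [hcond, reduceIte, reduceIte]
        exact ih g (i + 1) pos (by omega) (by omega)
    · rw [pvLoopA_out cs _ i pos _ _ _ _ _ (by omega)]
      have hEnd : pvSkipBlock cs (cs.length + 1) i = cs.length := by
        rw [pvSkipBlock, if_pos (pvFFGe cs '*' i (by omega))]
      rw [hEnd, pvLoopA_out cs g cs.length pos _ _ _ _ _ (by omega)]

theorem pvSingleSkip (cs : List Char) :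
    ∀ f g i pos, cs.length - i ≤ f → cs.length - i ≤ g →
      pvLoopA cs f i pos true false false false false =
        pvLoopA cs g (pvSkipQuoted cs '\'' (cs.length + 1) i) pos false false false false false := by
  intro f
  induction f with
  | zero =>
    intro g i pos hf hg
    rw [pvLoopA_out cs 0 i pos _ _ _ _ _ (by omega)]
    have hEnd : pvSkipQuoted cs '\'' (cs.length + 1) i = cs.length := by
      rw [pvSkipQuoted, if_pos (pvFFGe cs '\'' i (by omega))]
    rw [hEnd, pvLoopA_out cs g cs.length pos _ _ _ _ _ (by omega)]
  | succ f ih =>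
    intro g i pos hf hg
    by_cases hlt : i < cs.length
    · obtain ⟨x, hc⟩ : ∃ x, cs[i]? = some x := ⟨cs[i], List.getElem?_eq_getElem hlt⟩
      have hg2 : cs.getD i ' ' = x := by simp [List.getD_eq_getElem?_getD, hc]
      by_cases hx : x = '\''
      · have hff : PySem.Chars.findFrom cs ['\''] (i : Int) none = (i : Int) :=
          pvFFHit cs '\'' i (hx ▸ hc)
        by_cases hn : cs[i + 1]? = some '\''
        · have hEnd : pvSkipQuoted cs '\'' (cs.length + 1) i = pvSkipQuoted cs '\'' (cs.length + 1) (i + 2) := by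
            conv_lhs => rw [pvSkipQuoted]
            simp only [hff]
            rw [if_neg (by omega)]
            simp only [Int.toNat_natCast, hn, reduceIte, if_pos]
            exact pvSkipQuoted_fuel cs '\'' cs.length (cs.length + 1) (i + 2) (by omega) (by omega)
          rw [hEnd]
          conv_lhs => rw [pvLoopA]
          rw [if_pos hlt]
          simp only [hg2, hx, hn, reduceIte, and_self, reduceIte]
          exact ih g (i + 2) pos (by omega) (by omega)
        · have hEnd : pvSkipQuoted cs '\'' (cs.length + 1) i = i + 1 := by
            rw [pvSkipQuoted]
            simp only [hff]
            rw [if_neg (by omega)]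
            simp [hn]
          rw [hEnd]
          conv_lhs => rw [pvLoopA]
          rw [if_pos hlt]
          simp only [hg2, hx, hn, reduceIte, and_false, reduceIte]
          exact pvLoopA_fuel cs f g (i + 1) pos false false false false false (by omega) (by omega)
      · rw [pvSkipQuotedStep cs '\'' x (cs.length + 1) i hc hx]
        conv_lhs => rw [pvLoopA]
        rw [if_pos hlt]
        have hcond : (cs.getD i ' ' = '\'' ∧ cs[i + 1]? = some '\'') = False := by
          rw [hg2]; simp [hx]
        have hflag : (if cs.getD i ' ' = '\'' then false else true) = true := by
          rw [hg2, if_neg hx]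
        simp only [hcond, hflag, reduceIte, reduceIte]
        exact ih g (i + 1) pos (by omega) (by omega)
    · rw [pvLoopA_out cs _ i pos _ _ _ _ _ (by omega)]
      have hEnd : pvSkipQuoted cs '\'' (cs.length + 1) i = cs.length := by
        rw [pvSkipQuoted, if_pos (pvFFGe cs '\'' i (by omega))]
      rw [hEnd, pvLoopA_out cs g cs.length pos _ _ _ _ _ (by omega)]

theorem pvDoubleSkip (cs : List Char) :
    ∀ f g i pos, cs.length - i ≤ f → cs.length - i ≤ g →
      pvLoopA cs f i pos false true false false false =
        pvLoopA cs g (pvSkipQuoted cs '"' (cs.length + 1) i) pos false false false false false := by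
  intro f
  induction f with
  | zero =>
    intro g i pos hf hg
    rw [pvLoopA_out cs 0 i pos _ _ _ _ _ (by omega)]
    have hEnd : pvSkipQuoted cs '"' (cs.length + 1) i = cs.length := by
      rw [pvSkipQuoted, if_pos (pvFFGe cs '"' i (by omega))]
    rw [hEnd, pvLoopA_out cs g cs.length pos _ _ _ _ _ (by omega)]
  | succ f ih =>
    intro g i pos hf hg
    by_cases hlt : i < cs.length
    · obtain ⟨x, hc⟩ : ∃ x, cs[i]? = some x := ⟨cs[i], List.getElem?_eq_getElem hlt⟩
      have hg2 : cs.getD i ' ' = x := by simp [List.getD_eq_getElem?_getD, hc]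
      by_cases hx : x = '"'
      · have hff : PySem.Chars.findFrom cs ['"'] (i : Int) none = (i : Int) :=
          pvFFHit cs '"' i (hx ▸ hc)
        by_cases hn : cs[i + 1]? = some '"'
        · have hEnd : pvSkipQuoted cs '"' (cs.length + 1) i = pvSkipQuoted cs '"' (cs.length + 1) (i + 2) := by
            conv_lhs => rw [pvSkipQuoted]
            simp only [hff]
            rw [if_neg (by omega)]
            simp only [Int.toNat_natCast, hn, reduceIte, if_pos]
            exact pvSkipQuoted_fuel cs '"' cs.length (cs.length + 1) (i + 2) (by omega) (by omega)
          rw [hEnd]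
          conv_lhs => rw [pvLoopA]
          rw [if_pos hlt]
          simp only [hg2, hx, hn, reduceIte, and_self, reduceIte]
          exact ih g (i + 2) pos (by omega) (by omega)
        · have hEnd : pvSkipQuoted cs '"' (cs.length + 1) i = i + 1 := by
            rw [pvSkipQuoted]
            simp only [hff]
            rw [if_neg (by omega)]
            simp [hn]
          rw [hEnd]
          conv_lhs => rw [pvLoopA]
          rw [if_pos hlt]
          simp only [hg2, hx, hn, reduceIte, and_false, reduceIte]
          exact pvLoopA_fuel cs f g (i + 1) pos false false false false false (by omega) (by omega)
      · rw [pvSkipQuotedStep cs '"' x (cs.length + 1) i hc hx]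
        conv_lhs => rw [pvLoopA]
        rw [if_pos hlt]
        have hcond : (cs.getD i ' ' = '"' ∧ cs[i + 1]? = some '"') = False := by
          rw [hg2]; simp [hx]
        have hflag : (if cs.getD i ' ' = '"' then false else true) = true := by
          rw [hg2, if_neg hx]
        simp only [hcond, hflag, reduceIte, reduceIte]
        exact ih g (i + 1) pos (by omega) (by omega)
    · rw [pvLoopA_out cs _ i pos _ _ _ _ _ (by omega)]
      have hEnd : pvSkipQuoted cs '"' (cs.length + 1) i = cs.length := by
        rw [pvSkipQuoted, if_pos (pvFFGe cs '"' i (by omega))]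
      rw [hEnd, pvLoopA_out cs g cs.length pos _ _ _ _ _ (by omega)]

theorem pvBacktickSkip (cs : List Char) :
    ∀ f g i pos, cs.length - i ≤ f → cs.length - i ≤ g →
      pvLoopA cs f i pos false false true false false =
        pvLoopA cs g (pvSkipQuoted cs '`' (cs.length + 1) i) pos false false false false false := by
  intro f
  induction f with
  | zero =>
    intro g i pos hf hg
    rw [pvLoopA_out cs 0 i pos _ _ _ _ _ (by omega)]
    have hEnd : pvSkipQuoted cs '`' (cs.length + 1) i = cs.length := by
      rw [pvSkipQuoted, if_pos (pvFFGe cs '`' i (by omega))]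
    rw [hEnd, pvLoopA_out cs g cs.length pos _ _ _ _ _ (by omega)]
  | succ f ih =>
    intro g i pos hf hg
    by_cases hlt : i < cs.length
    · obtain ⟨x, hc⟩ : ∃ x, cs[i]? = some x := ⟨cs[i], List.getElem?_eq_getElem hlt⟩
      have hg2 : cs.getD i ' ' = x := by simp [List.getD_eq_getElem?_getD, hc]
      by_cases hx : x = '`'
      · have hff : PySem.Chars.findFrom cs ['`'] (i : Int) none = (i : Int) :=
          pvFFHit cs '`' i (hx ▸ hc)
        by_cases hn : cs[i + 1]? = some '`'
        · have hEnd : pvSkipQuoted cs '`' (cs.length + 1) i = pvSkipQuoted cs '`' (cs.length + 1) (i + 2) := by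
            conv_lhs => rw [pvSkipQuoted]
            simp only [hff]
            rw [if_neg (by omega)]
            simp only [Int.toNat_natCast, hn, reduceIte, if_pos]
            exact pvSkipQuoted_fuel cs '`' cs.length (cs.length + 1) (i + 2) (by omega) (by omega)
          rw [hEnd]
          conv_lhs => rw [pvLoopA]
          rw [if_pos hlt]
          simp only [hg2, hx, hn, reduceIte, and_self, reduceIte]
          exact ih g (i + 2) pos (by omega) (by omega)
        · have hEnd : pvSkipQuoted cs '`' (cs.length + 1) i = i + 1 := by
            rw [pvSkipQuoted]
            simp only [hff]
            rw [if_neg (by omega)]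
            simp [hn]
          rw [hEnd]
          conv_lhs => rw [pvLoopA]
          rw [if_pos hlt]
          simp only [hg2, hx, hn, reduceIte, and_false, reduceIte]
          exact pvLoopA_fuel cs f g (i + 1) pos false false false false false (by omega) (by omega)
      · rw [pvSkipQuotedStep cs '`' x (cs.length + 1) i hc hx]
        conv_lhs => rw [pvLoopA]
        rw [if_pos hlt]
        have hcond : (cs.getD i ' ' = '`' ∧ cs[i + 1]? = some '`') = False := by
          rw [hg2]; simp [hx]
        have hflag : (if cs.getD i ' ' = '`' then false else true) = true := by
          rw [hg2, if_neg hx]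
        simp only [hcond, hflag, reduceIte, reduceIte]
        exact ih g (i + 1) pos (by omega) (by omega)
    · rw [pvLoopA_out cs _ i pos _ _ _ _ _ (by omega)]
      have hEnd : pvSkipQuoted cs '`' (cs.length + 1) i = cs.length := by
        rw [pvSkipQuoted, if_pos (pvFFGe cs '`' i (by omega))]
      rw [hEnd, pvLoopA_out cs g cs.length pos _ _ _ _ _ (by omega)]

theorem pvMain (cs : List Char) :
    ∀ f g i pos, cs.length - i ≤ f → cs.length - i ≤ g →
      pvLoopA cs f i pos false false false false false = pvLoopB cs g i pos := by
  intro f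
  induction f with
  | zero =>
    intro g i pos hf hg
    rw [pvLoopA_out cs 0 i pos _ _ _ _ _ (by omega), pvLoopB_out cs g i pos (by omega)]
  | succ f ih =>
    intro g i pos hf hg
    by_cases hlt : i < cs.length
    · obtain ⟨g', rfl⟩ : ∃ g', g = g' + 1 := ⟨g - 1, by omega⟩
      obtain ⟨x, hc⟩ : ∃ x, cs[i]? = some x := ⟨cs[i], List.getElem?_eq_getElem hlt⟩
      have hg2 : cs.getD i ' ' = x := by simp [List.getD_eq_getElem?_getD, hc]
      conv_lhs => rw [pvLoopA]
      conv_rhs => rw [pvLoopB]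
      rw [if_pos hlt, if_pos hlt]
      by_cases h1 : x = '-' ∧ cs[i + 1]? = some '-'
      · obtain ⟨hx, hn⟩ := h1
        have hn2 : i + 1 < cs.length := (List.getElem?_eq_some_iff.mp hn).1
        simp only [hg2, hx, hn, reduceIte, and_self]
        have hend : i + 2 ≤ pvLineEnd cs (i + 2) ∧ pvLineEnd cs (i + 2) ≤ cs.length + 1 := by
          unfold pvLineEnd
          split
          · omega
          · next hj => have := pvFindCharBounds cs '\n' (i + 2) hj; omega
        calc pvLoopA cs f (i + 2) pos false false false true false
            = pvLoopA cs g' (pvLineEnd cs (i + 2)) pos false false false false false :=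
              pvLineSkip cs f g' (i + 2) pos (by omega) (by omega)
          _ = pvLoopB cs g' (pvLineEnd cs (i + 2)) pos := by
              rcases Nat.lt_or_ge (pvLineEnd cs (i + 2)) cs.length with h | h
              · rw [pvLoopA_fuel cs g' f (pvLineEnd cs (i + 2)) pos
                    false false false false false (by omega) (by omega)]
                exact ih g' (pvLineEnd cs (i + 2)) pos (by omega) (by omega)
              · rw [pvLoopA_out cs g' _ pos _ _ _ _ _ (by omega),
                    pvLoopB_out cs g' _ pos (by omega)]
          _ = pvLoopB cs g' (if PySem.Chars.findFrom cs ['\n'] ((i + 2 : Nat) : Int) none = -1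
                then cs.length
                else (PySem.Chars.findFrom cs ['\n'] ((i + 2 : Nat) : Int) none).toNat + 1) pos := rfl
      · by_cases h2 : x = '/' ∧ cs[i + 1]? = some '*'
        · obtain ⟨hx, hn⟩ := h2
          simp [hc, hx, hn]
          have hge := pvSkipBlock_ge cs (cs.length + 1) (i + 2)
          calc pvLoopA cs f (i + 2) pos false false false false true
              = pvLoopA cs g' (pvSkipBlock cs (cs.length + 1) (i + 2)) pos false false false false false :=
                pvBlockSkip cs f g' (i + 2) pos (by omega) (by omega)
            _ = pvLoopB cs g' (pvSkipBlock cs (cs.length + 1) (i + 2)) pos := by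
                rcases Nat.lt_or_ge (pvSkipBlock cs (cs.length + 1) (i + 2)) cs.length with h | h
                · rw [pvLoopA_fuel cs g' f _ pos false false false false false
                      (by omega) (by omega)]
                  exact ih g' _ pos (by omega) (by omega)
                · rw [pvLoopA_out cs g' _ pos _ _ _ _ _ (by omega),
                      pvLoopB_out cs g' _ pos (by omega)]
        · by_cases h3 : x = '\''
          · subst h3
            simp [hc, h1, h2]
            have hge := pvSkipQuoted_ge cs '\'' (cs.length + 1) (i + 1)
            calc pvLoopA cs f (i + 1) pos true false false false false
                = pvLoopA cs g' (pvSkipQuoted cs '\'' (cs.length + 1) (i + 1)) pos false false false false false :=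
                  pvSingleSkip cs f g' (i + 1) pos (by omega) (by omega)
              _ = pvLoopB cs g' (pvSkipQuoted cs '\'' (cs.length + 1) (i + 1)) pos := by
                  rcases Nat.lt_or_ge (pvSkipQuoted cs '\'' (cs.length + 1) (i + 1)) cs.length with h | h
                  · rw [pvLoopA_fuel cs g' f _ pos false false false false false
                        (by omega) (by omega)]
                    exact ih g' _ pos (by omega) (by omega)
                  · rw [pvLoopA_out cs g' _ pos _ _ _ _ _ (by omega),
                        pvLoopB_out cs g' _ pos (by omega)]
          · by_cases h4 : x = '\"'
            · subst h4
              simp [hc, h1, h2]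
              have hge := pvSkipQuoted_ge cs '\"' (cs.length + 1) (i + 1)
              calc pvLoopA cs f (i + 1) pos false true false false false
                  = pvLoopA cs g' (pvSkipQuoted cs '\"' (cs.length + 1) (i + 1)) pos false false false false false :=
                    pvDoubleSkip cs f g' (i + 1) pos (by omega) (by omega)
                _ = pvLoopB cs g' (pvSkipQuoted cs '\"' (cs.length + 1) (i + 1)) pos := by
                    rcases Nat.lt_or_ge (pvSkipQuoted cs '\"' (cs.length + 1) (i + 1)) cs.length with h | h
                    · rw [pvLoopA_fuel cs g' f _ pos false false false false false
                          (by omega) (by omega)]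
                      exact ih g' _ pos (by omega) (by omega)
                    · rw [pvLoopA_out cs g' _ pos _ _ _ _ _ (by omega),
                          pvLoopB_out cs g' _ pos (by omega)]
            · by_cases h5 : x = '`'
              · subst h5
                simp [hc, h1, h2]
                have hge := pvSkipQuoted_ge cs '`' (cs.length + 1) (i + 1)
                calc pvLoopA cs f (i + 1) pos false false true false false
                    = pvLoopA cs g' (pvSkipQuoted cs '`' (cs.length + 1) (i + 1)) pos false false false false false :=
                      pvBacktickSkip cs f g' (i + 1) pos (by omega) (by omega)
                  _ = pvLoopB cs g' (pvSkipQuoted cs '`' (cs.length + 1) (i + 1)) pos := by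
                      rcases Nat.lt_or_ge (pvSkipQuoted cs '`' (cs.length + 1) (i + 1)) cs.length with h | h
                      · rw [pvLoopA_fuel cs g' f _ pos false false false false false
                            (by omega) (by omega)]
                        exact ih g' _ pos (by omega) (by omega)
                      · rw [pvLoopA_out cs g' _ pos _ _ _ _ _ (by omega),
                            pvLoopB_out cs g' _ pos (by omega)]
              · -- no opener at i: both loops take one plain step
                simp [hc, h1, h2, h3, h4, h5]
                exact ih g' (i + 1) _ (by omega) (by omega)
    · rw [pvLoopA_out cs _ i pos _ _ _ _ _ (by omega), pvLoopB_out cs g i pos (by omega)]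

-- ===== VERDICT (by name: the statement is the Claim_ definition above) =====
theorem top_level_semicolon_positions_py_spec : Claim_equal_top_level_semicolon_positions_py := by
  intro sql _
  unfold Spec_top_level_semicolon_positions_py top_level_semicolon_positions_py top_level_semicolon_positions_py_alt
  exact pvMain sql.toList sql.toList.length sql.toList.length 0 [] (by omega) (by omega)
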